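-- pv_equiv track=rewrite | github.com/Gimu-kun/chemistry_be | chemistry_data.py | _replicate_group_elements
-- ===== SOURCE A (Python) =====
-- def _replicate_group_elements(group, count):
--     processed = ""
--     j = 0
--     while j < len(group):
--         element = group[j]
--         j += 1
--         if j < len(group) and group[j].islower():
--             element += group[j]
--             j += 1
--         subscript = ""
--         while j < len(group) and group[j].isdigit():
--             subscript += group[j]
--             j += 1
--         original_count = int(subscript) if subscript else 1
--         new_count = original_count * count
--         processed += element
--         if new_count > 1: processed += str(new_count)
--     return processed
-- ===== SOURCE B (Python) =====
-- def _replicate_group_elements(group, count):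
--     # Single left-to-right fold over the characters with a pending-token state
--     # (elem buffer, subscript buffer), flushed whenever a new token starts.
--     def flush(parts, elem, sub):
--         if elem:
--             new = (int(sub) if sub else 1) * count
--             parts.append(elem)
--             if new > 1:
--                 parts.append(str(new))
--     parts = []
--     elem, sub = "", ""
--     for c in group:
--         if c.isdigit() and elem:
--             sub += c
--         elif c.islower() and len(elem) == 1 and not sub:
--             elem += c
--         else:
--             flush(parts, elem, sub)
--             elem, sub = c, ""
--     flush(parts, elem, sub)
--     return "".join(parts)
-- ===== Notes on version B (the rewrite author's own statement) =====
-- stated objective: faster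
-- what changed: A walks the string with a manual index, two nested inner while-loops per token, and quadratic string += accumulation; B is a single foldl over the characters carrying a pending (element, subscript) token state flushed into a parts list that is joined once at the end.
import Mathlib
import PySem

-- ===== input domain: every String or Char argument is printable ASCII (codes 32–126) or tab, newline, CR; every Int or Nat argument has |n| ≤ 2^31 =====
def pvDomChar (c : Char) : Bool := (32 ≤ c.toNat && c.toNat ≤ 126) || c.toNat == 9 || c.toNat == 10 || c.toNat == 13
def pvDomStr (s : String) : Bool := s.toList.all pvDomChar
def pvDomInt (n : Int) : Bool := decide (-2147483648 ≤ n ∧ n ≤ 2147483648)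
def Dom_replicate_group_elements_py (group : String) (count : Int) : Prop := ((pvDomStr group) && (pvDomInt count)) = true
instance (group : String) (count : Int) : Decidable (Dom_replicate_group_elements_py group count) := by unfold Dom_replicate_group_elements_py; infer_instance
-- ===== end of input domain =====

-- B replaces A's index-walk with nested inner loops and quadratic string += accumulation by a
-- single foldl over the characters carrying a pending (element, subscript) token state flushed
-- into a parts list joined once at the end (objective: faster; measured).


-- ===== PORT A =====
-- inner `while j < len(group) and group[j].isdigit()` loop: accumulates the subscript, returns the rest
def pvTakeDigitsA : List Char → List Char → (List Char × List Char)
  | sub, c :: rest => if PySem.Chars.isdigit c then pvTakeDigitsA (sub ++ [c]) rest else (sub, c :: rest)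
  | sub, [] => (sub, [])

theorem pvTakeDigitsA_len (sub l : List Char) : (pvTakeDigitsA sub l).2.length ≤ l.length := by
  induction l generalizing sub with
  | nil => simp [pvTakeDigitsA]
  | cons c rest ih =>
    simp only [pvTakeDigitsA]
    split
    · exact Nat.le_trans (ih _) (Nat.le_succ _)
    · simp

-- outer `while j < len(group)` loop of A, over the remaining suffix of the string
-- the `if j < len(group) and group[j].islower()` block: element chars and the rest
def pvSplitElem (c : Char) (rest : List Char) : List Char × List Char :=
  match rest with
  | d :: rest' => if PySem.Chars.islower d then ([c, d], rest') else ([c], d :: rest')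
  | [] => ([c], [])

theorem pvSplitElem_len (c : Char) (rest : List Char) : (pvSplitElem c rest).2.length ≤ rest.length := by
  cases rest with
  | nil => simp [pvSplitElem]
  | cons d rest' => simp only [pvSplitElem]; split <;> simp

def pvLoopA (count : Int) : List Char → List Char → List Char
  | processed, [] => processed
  | processed, c :: rest =>
      let er := pvSplitElem c rest
      let sr := pvTakeDigitsA [] er.2
      let original_count : Int := if sr.1 = [] then 1 else (PySem.Int.ofChars? sr.1).getD 0
      let new_count := original_count * count
      let processed1 := processed ++ er.1
      let processed2 := if new_count > 1 then processed1 ++ PySem.Int.toChars new_count else processed1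
      pvLoopA count processed2 sr.2
  termination_by _ l => l.length
  decreasing_by
    have h1 := pvTakeDigitsA_len ([] : List Char) (pvSplitElem c rest).2
    have h2 := pvSplitElem_len c rest
    simp only [List.length_cons]
    omega

def replicate_group_elements_py (group : String) (count : Int) : String :=
  String.ofList (pvLoopA count [] group.toList)

-- ===== PORT B =====
-- flush(parts, elem, sub): render the pending token into the parts list
def pvFlushB (count : Int) (parts : List (List Char)) (elem sub : List Char) : List (List Char) :=
  if elem = [] then parts
  else
    let nc : Int := (if sub = [] then 1 else (PySem.Int.ofChars? sub).getD 0) * count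
    let parts1 := parts ++ [elem]
    if nc > 1 then parts1 ++ [PySem.Int.toChars nc] else parts1

-- body of B's `for c in group` fold, over the state (parts, elem, sub)
def pvStepB (count : Int) (st : List (List Char) × List Char × List Char) (c : Char) :
    List (List Char) × List Char × List Char :=
  let (parts, elem, sub) := st
  if PySem.Chars.isdigit c && !elem.isEmpty then (parts, elem, sub ++ [c])
  else if PySem.Chars.islower c && elem.length == 1 && sub.isEmpty then (parts, elem ++ [c], sub)
  else (pvFlushB count parts elem sub, [c], [])

def replicate_group_elements_py_alt (group : String) (count : Int) : String :=
  let st := group.toList.foldl (pvStepB count) ([], [], [])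
  String.ofList (PySem.Chars.join [] (pvFlushB count st.1 st.2.1 st.2.2))

-- ===== PRECONDITION & SPEC =====
def Spec_replicate_group_elements_py (group : String) (count : Int) (out : String) : Prop := out = replicate_group_elements_py_alt group count
instance (group : String) (count : Int) (out : String) : Decidable (Spec_replicate_group_elements_py group count out) := by unfold Spec_replicate_group_elements_py; infer_instance

-- ===== CLAIM (what is proved, stated in full; the proofs are below) =====
def Claim_equal_replicate_group_elements_py : Prop := ∀ (group : String) (count : Int), Dom_replicate_group_elements_py group count → Spec_replicate_group_elements_py group count (replicate_group_elements_py group count)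

-- ===== LEMMAS AND PROOFS =====

-- rendering of one finished token (element chars, subscript chars)
def pvRender (count : Int) (sub : List Char) : List Char :=
  let nc : Int := (if sub = [] then 1 else (PySem.Int.ofChars? sub).getD 0) * count
  if nc > 1 then PySem.Int.toChars nc else []

theorem pvTakeDigitsA_eq (sub l : List Char) :
    pvTakeDigitsA sub l = (sub ++ l.takeWhile PySem.Chars.isdigit, l.dropWhile PySem.Chars.isdigit) := by
  induction l generalizing sub with
  | nil => simp [pvTakeDigitsA]
  | cons c rest ih =>
    simp only [pvTakeDigitsA, List.takeWhile, List.dropWhile]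
    by_cases h : PySem.Chars.isdigit c = true <;> simp [h, ih]

theorem pvLoopA_acc (count : Int) (l : List Char) :
    ∀ p, pvLoopA count p l = p ++ pvLoopA count [] l := by
  suffices H : ∀ n (l : List Char), l.length ≤ n → ∀ p, pvLoopA count p l = p ++ pvLoopA count [] l by
    exact H l.length l le_rfl
  intro n
  induction n with
  | zero =>
    intro l hl p
    have : l = [] := List.eq_nil_of_length_eq_zero (Nat.le_zero.mp hl)
    subst this; simp [pvLoopA]
  | succ n ih =>
    intro l hl p
    cases l with
    | nil => simp [pvLoopA]
    | cons c rest =>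
      rw [pvLoopA, pvLoopA]
      have h1 := pvTakeDigitsA_len ([] : List Char) (pvSplitElem c rest).2
      have h2 := pvSplitElem_len c rest
      simp only [List.length_cons] at hl
      conv_lhs => rw [ih _ (by omega)]
      conv_rhs => rw [ih _ (by omega)]
      split <;> split <;> simp

theorem pvJoin_nil (parts : List (List Char)) :
    PySem.Chars.join [] parts = parts.flatten := by
  induction parts with
  | nil => simp [PySem.Chars.join, List.intercalate]
  | cons p ps ih =>
    cases ps with
    | nil => simp [PySem.Chars.join, List.intercalate]
    | cons q qs =>
      rw [PySem.Chars.join_cons_cons]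
      simp [ih]

theorem pvFlushB_flatten (count : Int) (parts : List (List Char)) (e s : List Char) (he : e ≠ []) :
    (pvFlushB count parts e s).flatten = parts.flatten ++ e ++ pvRender count s := by
  simp only [pvFlushB, pvRender, if_neg he]
  split <;> split <;> simp [List.flatten_append]

theorem pv_not_digit_of_lower (c : Char) (h : PySem.Chars.islower c = true) :
    PySem.Chars.isdigit c = false := by
  simp only [PySem.Chars.islower, Bool.and_eq_true, decide_eq_true_eq] at h
  have h9 : ¬ (c ≤ '9') := fun hc => absurd (le_trans h.1 hc) (by decide)
  simp [PySem.Chars.isdigit, h9]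

-- one iteration of A's outer loop, written with takeWhile/dropWhile
theorem pvLoopA_cons (count : Int) (c : Char) (l : List Char) :
    pvLoopA count [] (c :: l) =
      (pvSplitElem c l).1
        ++ pvRender count ((pvSplitElem c l).2.takeWhile PySem.Chars.isdigit)
        ++ pvLoopA count [] ((pvSplitElem c l).2.dropWhile PySem.Chars.isdigit) := by
  conv_lhs => rw [pvLoopA]
  simp only [pvTakeDigitsA_eq, List.nil_append]
  rw [pvLoopA_acc]
  simp only [pvRender]
  split <;> split <;> simp

-- the B fold, continued from a reachable state, computes A's loop on the corresponding suffix
theorem pvMain (count : Int) (l : List Char) :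
    (∀ parts, ((let st := l.foldl (pvStepB count) (parts, [], []);
        pvFlushB count st.1 st.2.1 st.2.2).flatten) = parts.flatten ++ pvLoopA count [] l)
  ∧ (∀ parts c, ((let st := l.foldl (pvStepB count) (parts, [c], []);
        pvFlushB count st.1 st.2.1 st.2.2).flatten) = parts.flatten ++ pvLoopA count [] (c :: l))
  ∧ (∀ parts e s, e ≠ [] → (e.length ≠ 1 ∨ s ≠ []) →
      ((let st := l.foldl (pvStepB count) (parts, e, s);
        pvFlushB count st.1 st.2.1 st.2.2).flatten)
      = parts.flatten ++ e ++ pvRender count (s ++ l.takeWhile PySem.Chars.isdigit)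
          ++ pvLoopA count [] (l.dropWhile PySem.Chars.isdigit)) := by
  induction l with
  | nil =>
    refine ⟨?_, ?_, ?_⟩
    · intro parts; simp [pvFlushB, pvLoopA]
    · intro parts c
      simp only [List.foldl_nil]
      rw [pvFlushB_flatten count parts [c] [] (by simp), pvLoopA_cons]
      simp [pvSplitElem, pvLoopA]
    · intro parts e s he _
      simp only [List.foldl_nil]
      rw [pvFlushB_flatten count parts e s he]
      simp [pvLoopA]
  | cons x rest ih =>
    obtain ⟨ih1, ih2, ih3⟩ := ih
    refine ⟨?_, ?_, ?_⟩
    · -- fresh state: x always starts a new token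
      intro parts
      have hstep : pvStepB count (parts, [], []) x = (parts, [x], []) := by
        simp [pvStepB, pvFlushB]
      simp only [List.foldl_cons, hstep]
      exact ih2 parts x
    · -- one-char element, empty subscript
      intro parts c
      by_cases hd : PySem.Chars.isdigit x = true
      · have hl : PySem.Chars.islower x = false := by
          by_contra h
          have := pv_not_digit_of_lower x (by revert h; cases PySem.Chars.islower x <;> simp)
          simp [hd] at this
        have hstep : pvStepB count (parts, [c], []) x = (parts, [c], [x]) := by
          simp [pvStepB, hd]
        simp only [List.foldl_cons, hstep]
        rw [ih3 parts [c] [x] (by simp) (Or.inr (by simp)), pvLoopA_cons]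
        simp [pvSplitElem, hl, hd]
      · by_cases hl : PySem.Chars.islower x = true
        · have hstep : pvStepB count (parts, [c], []) x = (parts, [c, x], []) := by
            simp [pvStepB, hd, hl]
          simp only [List.foldl_cons, hstep]
          rw [ih3 parts [c, x] [] (by simp) (Or.inl (by simp)), pvLoopA_cons]
          simp [pvSplitElem, hl]
        · have hstep : pvStepB count (parts, [c], []) x = (pvFlushB count parts [c] [], [x], []) := by
            simp [pvStepB, hd, hl]
          simp only [List.foldl_cons, hstep]
          rw [ih2 _ x, pvFlushB_flatten count parts [c] [] (by simp), pvLoopA_cons (l := x :: rest)]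
          simp [pvSplitElem, hl, hd, pvRender]
    · -- locked token: a lowercase char can no longer attach
      intro parts e s he hlock
      by_cases hd : PySem.Chars.isdigit x = true
      · have hstep : pvStepB count (parts, e, s) x = (parts, e, s ++ [x]) := by
          simp [pvStepB, hd, he]
        simp only [List.foldl_cons, hstep]
        rw [ih3 parts e (s ++ [x]) he (Or.inr (by simp))]
        simp [hd]
      · have hstep : pvStepB count (parts, e, s) x = (pvFlushB count parts e s, [x], []) := by
          by_cases hl : PySem.Chars.islower x = true
          · rcases hlock with h1 | h2
            · simp [pvStepB, hd, hl, h1]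
            · simp [pvStepB, hd, hl, h2]
          · simp [pvStepB, hd, hl]
        simp only [List.foldl_cons, hstep]
        rw [ih2 _ x, pvFlushB_flatten count parts e s he]
        simp [hd, pvRender]

-- ===== VERDICT (by name: the statement is the Claim_ definition above) =====
theorem replicate_group_elements_py_spec : Claim_equal_replicate_group_elements_py := by
  intro group count _
  show _ = _
  unfold replicate_group_elements_py replicate_group_elements_py_alt
  simp only [pvJoin_nil]
  have h := (pvMain count group.toList).1 []
  simp only [List.flatten_nil, List.nil_append] at h
  rw [h]
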